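-- pv_equiv track=rewrite | github.com/freeshyam/lc | islands_remix.py | num_inner_islands
-- ===== SOURCE A (Python) =====
-- def num_inner_islands(grid):
--     """
--     :type grid: List[List[str]]
--     :rtype: int
--     """
--     if not grid or not grid[0]:
--         return 0
--
--     def dfs(r, c):
--         if r < 0 or r == num_rows or c < 0 or c == num_cols:
--             return False
--         if grid[r][c] == '0':
--             return True
--
--         grid[r][c] = '0'
--
--         res_left = dfs(r, c - 1)
--         res_up = dfs(r - 1, c)
--         res_right = dfs(r, c + 1)
--         res_down = dfs(r + 1, c)
--
--         return res_left and res_up and res_right and res_down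
--
--     num_rows = len(grid)
--     num_cols = len(grid[0])
--
--     inner_island_count = 0
--     for i in range(num_rows):
--         for j in range(num_cols):
--             if grid[i][j] == '1' and dfs(i, j):
--                 inner_island_count += 1
--
--     return inner_island_count
-- ===== SOURCE B (Python) =====
-- def num_inner_islands(grid):
--     """Iterative flood-fill with an explicit stack instead of recursive DFS.
--     Like the original, it zeroes every visited island cell in place."""
--     if not grid or not grid[0]:
--         return 0
--
--     rows, cols = len(grid), len(grid[0])
--     count = 0
--     for i in range(rows):
--         for j in range(cols):
--             if grid[i][j] != '1':
--                 continue
--             touches_border = False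
--             stack = [(i, j)]
--             while stack:
--                 r, c = stack.pop()
--                 if r < 0 or r >= rows or c < 0 or c >= cols:
--                     # a flooded cell had a neighbour outside the grid
--                     touches_border = True
--                     continue
--                 if grid[r][c] == '0':
--                     continue
--                 grid[r][c] = '0'
--                 stack.append((r + 1, c))
--                 stack.append((r, c + 1))
--                 stack.append((r - 1, c))
--                 stack.append((r, c - 1))
--             if not touches_border:
--                 count += 1
--     return count
-- ===== Notes on version B (the rewrite author's own statement) =====
-- stated objective: idiomatic
-- what changed: The recursive 4-way DFS closure is replaced by an iterative flood fill with an explicit stack that drains each whole island and records a touches_border flag, counting the island only if the flag stayed false.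
import Mathlib
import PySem

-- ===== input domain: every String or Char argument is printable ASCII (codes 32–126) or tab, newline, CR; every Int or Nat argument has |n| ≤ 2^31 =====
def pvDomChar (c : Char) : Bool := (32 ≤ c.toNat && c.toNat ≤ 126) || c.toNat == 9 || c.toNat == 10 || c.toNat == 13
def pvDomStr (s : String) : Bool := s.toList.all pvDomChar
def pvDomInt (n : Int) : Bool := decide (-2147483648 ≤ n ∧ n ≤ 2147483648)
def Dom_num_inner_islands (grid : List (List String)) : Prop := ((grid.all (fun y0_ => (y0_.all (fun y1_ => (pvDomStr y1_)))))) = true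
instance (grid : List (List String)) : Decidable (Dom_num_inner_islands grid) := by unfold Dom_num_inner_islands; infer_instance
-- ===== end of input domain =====

-- B replaces the recursive 4-way DFS by an iterative explicit-stack flood fill (idiomatic
-- decomposition, same cost). Both the Python A and the Python B zero the visited island
-- cells of `grid` in place in the same way; the theorems below are about the return value.

-- ===== PORT A =====

-- grid[r][c] read: out-of-range access defaults to "0"; under Pre_ every actual access is
-- in range (0 ≤ r,c checked before the read), so the default is never consulted there.
def pvCell (g : List (List String)) (r c : Int) : String :=
  (PySem.List.pyGet? ((PySem.List.pyGet? g r).getD []) c).getD "0"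

-- grid[r][c] = '0' write; only invoked after 0 ≤ r, 0 ≤ c have been checked.
def pvSetCell (g : List (List String)) (r c : Int) : List (List String) :=
  g.set r.toNat ((g.getD r.toNat []).set c.toNat "0")

-- number of non-"0" cells: the termination measure of the flood fill and the fuel bound of the DFS
def pvLand (g : List (List String)) : Nat :=
  (g.map (fun row => row.countP (fun s => s != "0"))).sum

-- Python's dfs closure; `fuel` is only a Lean totality guard (each top-level call passes
-- pvLand g + 1, which is never exhausted since every nested call first zeroes a land cell).
def pvDfsA (rows cols : Int) : Nat → Int → Int → List (List String) → Bool × List (List String)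
  | 0, _, _, g => (true, g)
  | fuel + 1, r, c, g =>
    if r < 0 ∨ r = rows ∨ c < 0 ∨ c = cols then (false, g)
    else if pvCell g r c = "0" then (true, g)
    else
      let g0 := pvSetCell g r c
      let p1 := pvDfsA rows cols fuel r (c - 1) g0
      let p2 := pvDfsA rows cols fuel (r - 1) c p1.2
      let p3 := pvDfsA rows cols fuel r (c + 1) p2.2
      let p4 := pvDfsA rows cols fuel (r + 1) c p3.2
      (p1.1 && p2.1 && p3.1 && p4.1, p4.2)

def num_inner_islands (grid : List (List String)) : Int :=
  if grid = [] ∨ grid.headD [] = [] then 0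
  else
    let rows : Int := grid.length
    let cols : Int := (grid.headD []).length
    ((PySem.List.pyRange 0 rows 1).foldl (fun st i =>
        (PySem.List.pyRange 0 cols 1).foldl (fun st j =>
          if pvCell st.2 i j = "1" then
            let p := pvDfsA rows cols (pvLand st.2 + 1) i j st.2
            (if p.1 then st.1 + 1 else st.1, p.2)
          else st) st) ((0 : Int), grid)).1

-- ===== PORT B =====

-- termination of the flood fill: zeroing the checked land cell strictly shrinks pvLand

theorem pvCountP_set_lt (l : List String) (j : Nat) (v : String)
    (h : l[j]? = some v) (hv : v ≠ "0") :
    (l.set j "0").countP (fun s => s != "0") < l.countP (fun s => s != "0") := by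
  induction l generalizing j with
  | nil => simp at h
  | cons a t ih =>
    cases j with
    | zero =>
      simp at h
      subst h
      simp [hv]
    | succ j =>
      simp at h
      have := ih j h
      simp [List.countP_cons]
      omega

theorem pvLand_cons (row : List String) (g : List (List String)) :
    pvLand (row :: g) = row.countP (fun s => s != "0") + pvLand g := by
  simp [pvLand]

theorem pvLand_set_lt_aux (g : List (List String)) (i : Nat) (row row' : List String)
    (hg : g[i]? = some row)
    (hlt : row'.countP (fun s => s != "0") < row.countP (fun s => s != "0")) :
    pvLand (g.set i row') < pvLand g := by
  induction g generalizing i with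
  | nil => simp at hg
  | cons a t ih =>
    cases i with
    | zero =>
      simp at hg
      subst hg
      simp [pvLand_cons]
      omega
    | succ i =>
      simp at hg
      have := ih i hg
      simp [pvLand_cons]
      omega



theorem pvCell_land (g : List (List String)) (r c : Int) (hr : 0 ≤ r) (hc : 0 ≤ c)
    (h : pvCell g r c ≠ "0") :
    ∃ row, g[r.toNat]? = some row ∧ ∃ v, row[c.toNat]? = some v ∧ v ≠ "0" := by
  obtain ⟨n, rfl⟩ : ∃ n : Nat, r = (n : Int) := ⟨r.toNat, (Int.toNat_of_nonneg hr).symm⟩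
  obtain ⟨m, rfl⟩ : ∃ m : Nat, c = (m : Int) := ⟨c.toNat, (Int.toNat_of_nonneg hc).symm⟩
  unfold pvCell at h
  simp only [PySem.List.pyGet?_natCast, Int.toNat_natCast] at h ⊢
  cases hg : g[n]? with
  | none => rw [hg] at h; simp at h
  | some row =>
    rw [hg] at h
    simp only [Option.getD_some] at h
    cases hrow : row[m]? with
    | none => rw [hrow] at h; simp at h
    | some v =>
      rw [hrow] at h
      simp only [Option.getD_some] at h
      refine ⟨row, ?_, v, ?_, h⟩ <;> simp_all

theorem pvSetCell_lt (g : List (List String)) (r c : Int) (hr : 0 ≤ r) (hc : 0 ≤ c)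
    (h : pvCell g r c ≠ "0") : pvLand (pvSetCell g r c) < pvLand g := by
  obtain ⟨row, hg, v, hrow, hv⟩ := pvCell_land g r c hr hc h
  have hget : g.getD r.toNat [] = row := by
    rw [List.getD_eq_getElem?_getD, hg]; rfl
  unfold pvSetCell
  rw [hget]
  exact pvLand_set_lt_aux g r.toNat row (row.set c.toNat "0") hg
    (pvCountP_set_lt row c.toNat v hrow hv)

-- Python B's while loop over the explicit stack (Lean list head = Python stack top)
def pvFlood (rows cols : Int) (stack : List (Int × Int)) (g : List (List String)) (t : Bool) :
    Bool × List (List String) :=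
  match stack with
  | [] => (t, g)
  | (r, c) :: rest =>
    if hout : r < 0 ∨ rows ≤ r ∨ c < 0 ∨ cols ≤ c then
      pvFlood rows cols rest g true
    else if h0 : pvCell g r c = "0" then
      pvFlood rows cols rest g t
    else
      pvFlood rows cols ((r, c - 1) :: (r - 1, c) :: (r, c + 1) :: (r + 1, c) :: rest)
        (pvSetCell g r c) t
termination_by (pvLand g, stack.length)
decreasing_by
  · apply Prod.Lex.right; simp
  · apply Prod.Lex.right; simp
  · apply Prod.Lex.left
    exact pvSetCell_lt g r c (by omega) (by omega) h0

def num_inner_islands_alt (grid : List (List String)) : Int :=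
  if grid = [] ∨ grid.headD [] = [] then 0
  else
    let rows : Int := grid.length
    let cols : Int := (grid.headD []).length
    ((PySem.List.pyRange 0 rows 1).foldl (fun st i =>
        (PySem.List.pyRange 0 cols 1).foldl (fun st j =>
          if pvCell st.2 i j = "1" then
            let q := pvFlood rows cols [(i, j)] st.2 false
            (if q.1 then st.1 else st.1 + 1, q.2)
          else st) st) ((0 : Int), grid)).1

-- ===== PRECONDITION & SPEC =====
-- Pre_ excludes exactly the ragged grids on which the Python A raises IndexError: whenever
-- some row is shorter than row 0, the scan `grid[i][j]` for j < len(grid[0]) reaches a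
-- missing cell and raises (Python B raises there too).
def Pre_num_inner_islands (grid : List (List String)) : Prop :=
  ∀ row ∈ grid, (grid.headD []).length ≤ row.length
instance (grid : List (List String)) : Decidable (Pre_num_inner_islands grid) := by
  unfold Pre_num_inner_islands; infer_instance

def pvWitness_num_inner_islands : List (List String) :=
  [["0", "0", "0"], ["0", "1", "0"], ["0", "0", "0"]]

def Spec_num_inner_islands (grid : List (List String)) (out : Int) : Prop := out = num_inner_islands_alt grid
instance (grid : List (List String)) (out : Int) : Decidable (Spec_num_inner_islands grid out) := by unfold Spec_num_inner_islands; infer_instance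

-- ===== CLAIM (what is proved, stated in full; the proofs are below) =====
def Claim_equal_num_inner_islands : Prop := ∀ (grid : List (List String)), Dom_num_inner_islands grid → Pre_num_inner_islands grid → Spec_num_inner_islands grid (num_inner_islands grid)

-- ===== LEMMAS AND PROOFS =====

theorem pvCountP_set_le (l : List String) (j : Nat) :
    (l.set j "0").countP (fun s => s != "0") ≤ l.countP (fun s => s != "0") := by
  induction l generalizing j with
  | nil => simp
  | cons a t ih =>
    cases j with
    | zero => simp [List.countP_cons]
    | succ j => simpa [List.countP_cons] using ih j

theorem pvLand_set_le_aux (g : List (List String)) (i : Nat) (j : Nat) :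
    pvLand (g.set i ((g.getD i []).set j "0")) ≤ pvLand g := by
  induction g generalizing i with
  | nil => simp
  | cons a t ih =>
    cases i with
    | zero =>
      simp [List.getD, pvLand_cons]
      have := pvCountP_set_le a j
      omega
    | succ i =>
      have := ih i
      simp [List.getD] at this ⊢
      simp [pvLand_cons]
      omega

theorem pvSetCell_le (g : List (List String)) (r c : Int) :
    pvLand (pvSetCell g r c) ≤ pvLand g :=
  pvLand_set_le_aux g r.toNat c.toNat


-- the DFS never creates land
theorem pvDfsA_le (rows cols : Int) (fuel : Nat) :
    ∀ (r c : Int) (g : List (List String)), pvLand (pvDfsA rows cols fuel r c g).2 ≤ pvLand g := by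
  induction fuel with
  | zero => intro r c g; simp [pvDfsA]
  | succ fuel ih =>
    intro r c g
    simp only [pvDfsA]
    split
    · simp
    · split
      · simp
      · calc pvLand (pvDfsA rows cols fuel (r + 1) c _).2 ≤ _ := ih _ _ _
          _ ≤ _ := ih _ _ _
          _ ≤ _ := ih _ _ _
          _ ≤ _ := ih _ _ _
          _ ≤ pvLand g := pvSetCell_le g r c

-- one stack entry of the flood fill behaves exactly like one dfs call of A
theorem pvSim (k : Nat) :
    ∀ (fuel : Nat) (rows cols r c : Int) (stack : List (Int × Int))
      (g : List (List String)) (t : Bool),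
      pvLand g ≤ k → pvLand g < fuel →
      -1 ≤ r → r ≤ rows → -1 ≤ c → c ≤ cols →
      pvFlood rows cols ((r, c) :: stack) g t =
        pvFlood rows cols stack (pvDfsA rows cols fuel r c g).2
          (t || !(pvDfsA rows cols fuel r c g).1) := by
  induction k with
  | zero =>
    intro fuel rows cols r c stack g t hk hf hr1 hr2 hc1 hc2
    cases fuel with
    | zero => omega
    | succ fuel =>
      rw [pvFlood]
      by_cases hout : r < 0 ∨ rows ≤ r ∨ c < 0 ∨ cols ≤ c
      · have hA : r < 0 ∨ r = rows ∨ c < 0 ∨ c = cols := by omega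
        simp only [pvDfsA, if_pos hA, dif_pos hout]
        simp
      · have hA : ¬ (r < 0 ∨ r = rows ∨ c < 0 ∨ c = cols) := by omega
        by_cases h0 : pvCell g r c = "0"
        · simp only [pvDfsA, if_neg hA, if_pos h0, dif_neg hout, dif_pos h0]
          simp
        · exfalso
          have := pvSetCell_lt g r c (by omega) (by omega) h0
          omega
  | succ k ih =>
    intro fuel rows cols r c stack g t hk hf hr1 hr2 hc1 hc2
    cases fuel with
    | zero => omega
    | succ fuel =>
      rw [pvFlood]
      by_cases hout : r < 0 ∨ rows ≤ r ∨ c < 0 ∨ cols ≤ c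
      · have hA : r < 0 ∨ r = rows ∨ c < 0 ∨ c = cols := by omega
        simp only [pvDfsA, if_pos hA, dif_pos hout]
        simp
      · have hA : ¬ (r < 0 ∨ r = rows ∨ c < 0 ∨ c = cols) := by omega
        by_cases h0 : pvCell g r c = "0"
        · simp only [pvDfsA, if_neg hA, if_pos h0, dif_neg hout, dif_pos h0]
          simp
        · simp only [dif_neg hout, dif_neg h0]
          have hlt : pvLand (pvSetCell g r c) < pvLand g :=
            pvSetCell_lt g r c (by omega) (by omega) h0
          set g0 := pvSetCell g r c with hg0
          have hk0 : pvLand g0 ≤ k := by omega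
          have hf0 : pvLand g0 < fuel := by omega
          -- four nested calls, left, up, right, down
          set p1 := pvDfsA rows cols fuel r (c - 1) g0 with hp1
          set p2 := pvDfsA rows cols fuel (r - 1) c p1.2 with hp2
          set p3 := pvDfsA rows cols fuel r (c + 1) p2.2 with hp3
          set p4 := pvDfsA rows cols fuel (r + 1) c p3.2 with hp4
          have l1 : pvLand p1.2 ≤ pvLand g0 := pvDfsA_le _ _ _ _ _ _
          have l2 : pvLand p2.2 ≤ pvLand p1.2 := pvDfsA_le _ _ _ _ _ _
          have l3 : pvLand p3.2 ≤ pvLand p2.2 := pvDfsA_le _ _ _ _ _ _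
          rw [ih fuel rows cols r (c - 1) _ g0 t hk0 hf0 (by omega) (by omega) (by omega) (by omega)]
          rw [ih fuel rows cols (r - 1) c _ p1.2 _ (by omega) (by omega) (by omega) (by omega) (by omega) (by omega)]
          rw [ih fuel rows cols r (c + 1) _ p2.2 _ (by omega) (by omega) (by omega) (by omega) (by omega) (by omega)]
          rw [ih fuel rows cols (r + 1) c _ p3.2 _ (by omega) (by omega) (by omega) (by omega) (by omega) (by omega)]
          have hd : pvDfsA rows cols (fuel + 1) r c g =
              (p1.1 && p2.1 && p3.1 && p4.1, p4.2) := by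
            conv_lhs => rw [pvDfsA]
            rw [if_neg hA, if_neg h0]
          rw [hd]
          congr 1
          cases t <;> cases p1.1 <;> cases p2.1 <;> cases p3.1 <;> cases p4.1 <;> rfl

-- a fresh start cell: flood of a singleton stack = one dfs call
theorem pvStart (rows cols i j : Int) (g : List (List String))
    (hi1 : 0 ≤ i) (hi2 : i < rows) (hj1 : 0 ≤ j) (hj2 : j < cols) :
    pvFlood rows cols [(i, j)] g false =
      (!(pvDfsA rows cols (pvLand g + 1) i j g).1,
        (pvDfsA rows cols (pvLand g + 1) i j g).2) := by
  rw [pvSim (pvLand g) (pvLand g + 1) rows cols i j [] g false (le_refl _) (by omega)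
      (by omega) (by omega) (by omega) (by omega)]
  rw [pvFlood]
  simp

-- ===== VERDICT (by name: the statement is the Claim_ definition above) =====
theorem num_inner_islands_spec : Claim_equal_num_inner_islands := by
  intro grid _ _
  unfold Spec_num_inner_islands num_inner_islands num_inner_islands_alt
  by_cases hg : grid = [] ∨ grid.headD [] = []
  · rw [if_pos hg, if_pos hg]
  · rw [if_neg hg, if_neg hg]
    dsimp only
    congr 1
    apply PySem.List.foldl_congr_mem
    intro st i hi
    rw [PySem.List.mem_pyRange_one] at hi
    apply PySem.List.foldl_congr_mem
    intro st j hj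
    rw [PySem.List.mem_pyRange_one] at hj
    by_cases hc : pvCell st.2 i j = "1"
    · simp only [if_pos hc]
      rw [pvStart _ _ i j st.2 hi.1 hi.2 hj.1 hj.2]
      cases hb : (pvDfsA (grid.length : Int) ((grid.headD []).length : Int)
          (pvLand st.2 + 1) i j st.2).1 <;> simp
    · simp only [if_neg hc]
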